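-- pv_equiv track=rewrite | github.com/aleksakojadinovic/DS3 | 12_flow/flow.py | network_to_residual_graph
-- ===== SOURCE A (Python) =====
-- import copy
--
-- def network_to_residual_graph(network):
--     residual_network = copy.deepcopy(network)
--     # First pass to add forward edges
--     for source_node in network:
--         for target_node in network[source_node]:
--             # We skip non existing edges for now
--             if source_node == target_node or network[source_node][target_node] == 0:
--                 residual_network[source_node][target_node] = None
--             else:
--                 # Otherwise we need to update its value to 0/capacity
--                 residual_network[source_node][target_node] = (0, network[source_node][target_node])
--
--
--
--     n_residual_network = copy.deepcopy(residual_network)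
--
--     for node_from in residual_network:
--         for node_to in residual_network:
--             if node_from == node_to or residual_network[node_from][node_to] is None or residual_network[node_to][node_from] is not None:
--                 continue
--             # n_residual_network[node_to][node_from] = (-residual_network[node_from][node_to][1], 0)
--             n_residual_network[node_to][node_from] = (0, 0)
--
--
--     return n_residual_network
-- ===== SOURCE B (Python) =====
-- def network_to_residual_graph(network):
--     def cell(i, row, j):
--         if i == j:
--             return None
--         cap = row[j]
--         if cap != 0:
--             return (0, cap)
--         if j in network and network[j][i] != 0:
--             return (0, 0)
--         return None
--     return {i: {j: cell(i, row, j) for j in row} for i, row in network.items()}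
-- ===== Notes on version B (the rewrite author's own statement) =====
-- stated objective: simpler
-- what changed: B computes each cell directly from the original network in one nested dict comprehension (diagonal is None; a nonzero forward capacity gives the 0/capacity pair; otherwise a nonzero reverse capacity gives the zero reverse edge; else None), replacing A's two deepcopies and two sequential mutation passes over a frozen intermediate.
import Mathlib
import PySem

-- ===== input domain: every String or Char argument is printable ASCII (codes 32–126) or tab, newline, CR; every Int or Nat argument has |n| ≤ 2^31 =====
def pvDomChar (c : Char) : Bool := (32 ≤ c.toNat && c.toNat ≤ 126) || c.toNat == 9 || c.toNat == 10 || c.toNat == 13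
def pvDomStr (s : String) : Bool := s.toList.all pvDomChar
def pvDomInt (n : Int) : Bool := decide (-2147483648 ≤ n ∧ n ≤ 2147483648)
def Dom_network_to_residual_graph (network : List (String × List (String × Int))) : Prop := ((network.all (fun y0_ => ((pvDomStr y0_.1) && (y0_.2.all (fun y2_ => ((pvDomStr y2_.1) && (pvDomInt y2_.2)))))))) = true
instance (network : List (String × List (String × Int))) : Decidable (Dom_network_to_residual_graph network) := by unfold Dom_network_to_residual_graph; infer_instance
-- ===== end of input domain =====

-- B replaces A's two deepcopies and two sequential mutation passes by one direct nested map that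
-- computes every cell straight from the original network (objective: simpler). Return value only;
-- neither version mutates its argument.

-- dict-as-assoc-list primitives (first-match lookup; in-place overwrite, append if key absent)
def pvLookup {V : Type} : List (String × V) → String → Option V
  | [], _ => none
  | p :: rest, k => if p.1 == k then some p.2 else pvLookup rest k

def pvSetk {V : Type} : List (String × V) → String → V → List (String × V)
  | [], k, v => [(k, v)]
  | p :: rest, k, v => if p.1 == k then (k, v) :: rest else p :: pvSetk rest k v

def pvMapRow {V : Type} : List (String × V) → String → (V → V) → List (String × V)
  | [], _, _ => []
  | p :: rest, s, g => if p.1 == s then (p.1, g p.2) :: rest else p :: pvMapRow rest s g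

-- residual[s][t] = v  (s is always a present outer key where A assigns)
def pvSetCell (res : List (String × List (String × Option (Int × Int)))) (s t : String)
    (v : Option (Int × Int)) : List (String × List (String × Option (Int × Int))) :=
  pvMapRow res s (fun r => pvSetk r t v)

-- residual[a][b] read; a KeyError is impossible under Pre_, so the defaults are never observed there
def pvCell (res : List (String × List (String × Option (Int × Int)))) (a b : String) :
    Option (Int × Int) :=
  (pvLookup ((pvLookup res a).getD []) b).getD none

-- ===== PORT A =====
def network_to_residual_graph (network : List (String × List (String × Int))) :
    List (String × List (String × Option (Int × Int))) :=
  -- residual_network = copy.deepcopy(network): same skeleton, values retyped to Option (Int × Int)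
  -- placeholders; every cell is overwritten by the first pass before any read.
  let residual0 := network.map (fun p => (p.1, p.2.map (fun q => (q.1, (none : Option (Int × Int))))))
  -- first pass: for source_node in network: for target_node in network[source_node]: ...
  let residual := network.foldl (fun res p =>
    ((pvLookup network p.1).getD []).foldl (fun res q =>
      let cap := (pvLookup ((pvLookup network p.1).getD []) q.1).getD 0  -- network[source][target]
      pvSetCell res p.1 q.1 (if p.1 == q.1 || cap == 0 then none else some (0, cap))) res) residual0
  -- n_residual_network = copy.deepcopy(residual_network): lists are immutable; reads use `residual`
  -- second pass: for node_from in residual_network: for node_to in residual_network: ...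
  residual.foldl (fun n p =>
    residual.foldl (fun n q =>
      if p.1 == q.1 then n
      else if (pvCell residual p.1 q.1).isNone then n      -- residual[from][to] is None
      else if (pvCell residual q.1 p.1).isSome then n      -- residual[to][from] is not None
      else pvSetCell n q.1 p.1 (some (0, 0))) n) residual

-- ===== PORT B =====
def pvAltCell (network : List (String × List (String × Int))) (i : String)
    (row : List (String × Int)) (j : String) : Option (Int × Int) :=
  if i == j then none
  else
    let cap := (pvLookup row j).getD 0                     -- row[j]; j is a key of row
    if cap ≠ 0 then some (0, cap)
    else match pvLookup network j with                     -- 'j in network'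
      | none => none
      | some rowj => if (pvLookup rowj i).getD 0 ≠ 0 then some (0, 0) else none  -- network[j][i]; present under Pre_

def network_to_residual_graph_alt (network : List (String × List (String × Int))) :
    List (String × List (String × Option (Int × Int))) :=
  network.map (fun p => (p.1, p.2.map (fun q => (q.1, pvAltCell network p.1 p.2 q.1))))

-- ===== PRECONDITION & SPEC =====
-- Pre_ excludes (a) association lists with duplicate outer or inner keys, where the list does not
-- faithfully encode a Python dict, and (b) networks with two distinct outer keys u, v such that
-- v is missing from u's inner dict, on which A raises KeyError in its second pass.
def Pre_network_to_residual_graph (network : List (String × List (String × Int))) : Prop :=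
  (network.map (·.1)).Nodup ∧
  (∀ p ∈ network, (p.2.map (·.1)).Nodup) ∧
  (∀ p ∈ network, ∀ q ∈ network, p.1 ≠ q.1 → q.1 ∈ p.2.map (·.1))
instance (network : List (String × List (String × Int))) : Decidable (Pre_network_to_residual_graph network) := by unfold Pre_network_to_residual_graph; infer_instance

def pvWitness_network_to_residual_graph : (List (String × List (String × Int))) :=
  [("a", [("b", 3), ("c", 0)])]

def Spec_network_to_residual_graph (network : List (String × List (String × Int))) (out : List (String × List (String × Option (Int × Int)))) : Prop := out = network_to_residual_graph_alt network
instance (network : List (String × List (String × Int))) (out : List (String × List (String × Option (Int × Int)))) : Decidable (Spec_network_to_residual_graph network out) := by unfold Spec_network_to_residual_graph; infer_instance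

-- ===== CLAIM (what is proved, stated in full; the proofs are below) =====
def Claim_equal_network_to_residual_graph : Prop := ∀ (network : List (String × List (String × Int))), Dom_network_to_residual_graph network → Pre_network_to_residual_graph network → Spec_network_to_residual_graph network (network_to_residual_graph network)

-- ===== LEMMAS AND PROOFS =====

theorem pvLookup_eq_none_iff {V : Type} (l : List (String × V)) (k : String) :
    pvLookup l k = none ↔ k ∉ l.map (·.1) := by
  induction l with
  | nil => simp [pvLookup]
  | cons p rest ih =>
    simp only [pvLookup, List.map_cons, List.mem_cons]
    by_cases h : p.1 = k
    · simp [h]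
    · simp [h, ih, beq_iff_eq, Ne.symm h]

theorem pvLookup_mem_nodup {V : Type} (l : List (String × V)) (p : String × V)
    (hp : p ∈ l) (hnd : (l.map (·.1)).Nodup) : pvLookup l p.1 = some p.2 := by
  induction l with
  | nil => simp at hp
  | cons x rest ih =>
    simp only [List.map_cons, List.nodup_cons] at hnd
    rcases List.mem_cons.1 hp with h | h
    · subst h; simp [pvLookup]
    · have hne : x.1 ≠ p.1 := by
        intro he; exact hnd.1 (he ▸ List.mem_map_of_mem (f := (·.1)) h)
      simp only [pvLookup, beq_iff_eq, hne, if_false]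
      exact ih h hnd.2

theorem pvMapRow_id {V : Type} (l : List (String × V)) (s : String) :
    pvMapRow l s (fun r => r) = l := by
  induction l with
  | nil => rfl
  | cons p rest ih =>
    obtain ⟨a, b⟩ := p
    simp only [pvMapRow]
    by_cases h : a = s <;> simp [h, ih]

theorem pvMapRow_comp {V : Type} (l : List (String × V)) (s : String) (g g' : V → V) :
    pvMapRow (pvMapRow l s g) s g' = pvMapRow l s (fun r => g' (g r)) := by
  induction l with
  | nil => rfl
  | cons p rest ih =>
    simp only [pvMapRow]
    by_cases h : p.1 = s
    · simp [pvMapRow, h]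
    · simp [pvMapRow, h, ih]

theorem pv_foldl_mapRow_skip {β V : Type} (G : (String × β) → V → V) :
    ∀ (l : List (String × β)) (x : String × V) (n : List (String × V)),
      (∀ p ∈ l, p.1 ≠ x.1) →
      l.foldl (fun n p => pvMapRow n p.1 (G p)) (x :: n)
        = x :: l.foldl (fun n p => pvMapRow n p.1 (G p)) n := by
  intro l
  induction l with
  | nil => intro x n _; rfl
  | cons p rest ih =>
    intro x n h
    have hx : x.1 ≠ p.1 := Ne.symm (h p (List.mem_cons_self ..))
    simp only [List.foldl_cons, pvMapRow, beq_iff_eq, hx, if_false]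
    exact ih x (pvMapRow n p.1 (G p)) (fun q hq => h q (List.mem_cons_of_mem _ hq))

theorem pv_foldl_mapRow {β V : Type} (G : (String × β) → V → V) :
    ∀ (l : List (String × β)) (n : List (String × V)),
      n.map (·.1) = l.map (·.1) → (l.map (·.1)).Nodup →
      l.foldl (fun n p => pvMapRow n p.1 (G p)) n
        = (l.zip n).map (fun pe => (pe.2.1, G pe.1 pe.2.2)) := by
  intro l
  induction l with
  | nil =>
    intro n hk _
    simp only [List.map_nil, List.map_eq_nil_iff] at hk
    simp [hk]
  | cons p rest ih =>
    intro n hk hnd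
    match n with
    | [] => simp at hk
    | x :: n' =>
      simp only [List.map_cons, List.cons.injEq] at hk
      simp only [List.map_cons, List.nodup_cons] at hnd
      have hx : x.1 = p.1 := hk.1
      simp only [List.foldl_cons, pvMapRow, hx, beq_self_eq_true, if_true]
      rw [pv_foldl_mapRow_skip G rest ((p.1, G p x.2)) _ ?skip]
      · rw [ih n' hk.2 hnd.2]; simp [List.zip, hx]
      case skip =>
        intro q hq he
        exact hnd.1 (he ▸ List.mem_map_of_mem (f := (·.1)) hq)

theorem pv_zip_map_self {α β : Type} (l : List α) (f : α → β) :
    l.zip (l.map f) = l.map (fun a => (a, f a)) := by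
  induction l with
  | nil => rfl
  | cons a rest ih => simp only [List.map_cons, List.zip_cons_cons, ih]

theorem pv_setk_fold_skip {β V : Type} (f : String → V) :
    ∀ (row : List (String × β)) (x : String × V) (r : List (String × V)),
      (∀ q ∈ row, q.1 ≠ x.1) →
      row.foldl (fun r q => pvSetk r q.1 (f q.1)) (x :: r)
        = x :: row.foldl (fun r q => pvSetk r q.1 (f q.1)) r := by
  intro row
  induction row with
  | nil => intro x r _; rfl
  | cons q rest ih =>
    intro x r h
    have hx : x.1 ≠ q.1 := Ne.symm (h q (List.mem_cons_self ..))
    simp only [List.foldl_cons, pvSetk, beq_iff_eq, hx, if_false]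
    exact ih x _ (fun q' hq' => h q' (List.mem_cons_of_mem _ hq'))

theorem pv_setk_fold_full {β V : Type} (f : String → V) :
    ∀ (row : List (String × β)) (r : List (String × V)),
      r.map (·.1) = row.map (·.1) → (row.map (·.1)).Nodup →
      row.foldl (fun r q => pvSetk r q.1 (f q.1)) r = row.map (fun q => (q.1, f q.1)) := by
  intro row
  induction row with
  | nil =>
    intro r hk _
    obtain rfl : r = [] := by
      cases r with
      | nil => rfl
      | cons a b => simp at hk
    rfl
  | cons q rest ih =>
    intro r hk hnd
    match r with
    | [] => simp at hk
    | x :: r' =>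
      simp only [List.map_cons, List.cons.injEq] at hk
      simp only [List.map_cons, List.nodup_cons] at hnd
      simp only [List.foldl_cons, pvSetk, hk.1, beq_self_eq_true, if_true]
      rw [pv_setk_fold_skip f rest (q.1, f q.1) r' ?skip]
      · rw [ih r' hk.2 hnd.2]; rfl
      case skip =>
        intro q' hq' he
        exact hnd.1 (he ▸ List.mem_map_of_mem (f := (·.1)) hq')

theorem pv_setk_map_of_mem {β V : Type} (row : List (String × β)) (h : (String × β) → V)
    (s : String) (v0 : V) (hnd : (row.map (·.1)).Nodup) (hs : s ∈ row.map (·.1)) :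
    pvSetk (row.map (fun c => (c.1, h c))) s v0
      = row.map (fun c => (c.1, if c.1 = s then v0 else h c)) := by
  induction row with
  | nil => simp at hs
  | cons c rest ih =>
    simp only [List.map_cons, List.nodup_cons] at hnd
    simp only [List.map_cons, List.mem_cons] at hs
    by_cases hc : c.1 = s
    · simp only [List.map_cons, pvSetk, beq_iff_eq, hc, if_true]
      congr 1
      apply List.map_congr_left
      intro c' hc'
      have : c'.1 ≠ s := by
        intro he; exact hnd.1 (hc ▸ he ▸ List.mem_map_of_mem (f := (·.1)) hc')
      simp [this]
    · simp only [List.map_cons, pvSetk, beq_iff_eq, hc, if_false]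
      rw [ih hnd.2 (hs.resolve_left (fun he => hc he.symm))]

-- the whole second pass written as one override of a key-indexed table
def pvNetMap (network : List (String × List (String × Int)))
    (w : String → String → Option (Int × Int)) : List (String × List (String × Option (Int × Int))) :=
  network.map (fun p => (p.1, p.2.map (fun q => (q.1, w q.1 p.1))))

-- the forward-pass cell value of A, as a pure function of the two keys
def pvVal (network : List (String × List (String × Int))) (s t : String) : Option (Int × Int) :=
  let cap := (pvLookup ((pvLookup network s).getD []) t).getD 0
  if s == t || cap == 0 then none else some (0, cap)

theorem pv_foldl_setCell {β : Type} (s : String) (v : String → Option (Int × Int)) :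
    ∀ (row : List (String × β)) (res : List (String × List (String × Option (Int × Int)))),
      row.foldl (fun res q => pvSetCell res s q.1 (v q.1)) res
        = pvMapRow res s (fun r => row.foldl (fun r q => pvSetk r q.1 (v q.1)) r) := by
  intro row
  induction row with
  | nil => intro res; exact (pvMapRow_id res s).symm
  | cons q rest ih =>
    intro res
    simp only [List.foldl_cons]
    rw [ih (pvSetCell res s q.1 (v q.1))]
    unfold pvSetCell
    rw [pvMapRow_comp]

theorem pv_pass1 (network : List (String × List (String × Int)))
    (hpre : Pre_network_to_residual_graph network) :
    network.foldl (fun res p =>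
      ((pvLookup network p.1).getD []).foldl (fun res q =>
        pvSetCell res p.1 q.1
          (if p.1 == q.1 || ((pvLookup ((pvLookup network p.1).getD []) q.1).getD 0) == 0 then none
           else some (0, (pvLookup ((pvLookup network p.1).getD []) q.1).getD 0))) res)
      (network.map (fun p => (p.1, p.2.map (fun q => (q.1, (none : Option (Int × Int)))))))
      = pvNetMap network (fun a b => pvVal network b a) := by
  obtain ⟨hnd, hinner, -⟩ := hpre
  have hstep : ∀ (res : List (String × List (String × Option (Int × Int))))
      (p : String × List (String × Int)),
      ((pvLookup network p.1).getD []).foldl (fun res q =>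
        pvSetCell res p.1 q.1
          (if p.1 == q.1 || ((pvLookup ((pvLookup network p.1).getD []) q.1).getD 0) == 0 then none
           else some (0, (pvLookup ((pvLookup network p.1).getD []) q.1).getD 0))) res
      = pvMapRow res p.1 (fun r => ((pvLookup network p.1).getD []).foldl (fun r q =>
          pvSetk r q.1 (pvVal network p.1 q.1)) r) := by
    intro res p
    exact pv_foldl_setCell p.1 (fun t => pvVal network p.1 t) _ res
  refine Eq.trans (PySem.List.foldl_congr_mem _ _ _ _ (fun res p _ => hstep res p)) ?_
  rw [pv_foldl_mapRow _ network _ (by simp [List.map_map]) hnd]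
  rw [pv_zip_map_self, List.map_map]
  apply List.map_congr_left
  intro p hp
  have hrow : pvLookup network p.1 = some p.2 := pvLookup_mem_nodup network p hp hnd
  simp only [Function.comp_apply, hrow, Option.getD_some]
  rw [pv_setk_fold_full (fun t => pvVal network p.1 t) p.2 _ (by simp [List.map_map]) (hinner p hp)]

theorem pv_pass2 (network : List (String × List (String × Int)))
    (hpre : Pre_network_to_residual_graph network)
    (R : List (String × List (String × Option (Int × Int)))) :
    ∀ (ks : List String) (w : String → String → Option (Int × Int)),
      (∀ s ∈ ks, s ∈ network.map (·.1)) →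
      ks.foldl (fun n s =>
        network.foldl (fun n p =>
          if s == p.1 then n
          else if (pvCell R s p.1).isNone then n
          else if (pvCell R p.1 s).isSome then n
          else pvSetCell n p.1 s (some (0, 0))) n) (pvNetMap network w)
      = pvNetMap network (fun a b =>
          if a ∈ ks ∧ ¬ a = b ∧ (pvCell R a b).isSome ∧ (pvCell R b a).isNone
          then some (0, 0) else w a b) := by
  obtain ⟨hnd, hinner, hcomp⟩ := hpre
  intro ks
  induction ks with
  | nil =>
    intro w _
    simp only [List.foldl_nil]
    congr 1
  | cons s ks' ih =>
    intro w hsub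
    simp only [List.foldl_cons]
    have hstep : ∀ (n : List (String × List (String × Option (Int × Int))))
        (p : String × List (String × Int)),
        (if s == p.1 then n
         else if (pvCell R s p.1).isNone then n
         else if (pvCell R p.1 s).isSome then n
         else pvSetCell n p.1 s (some (0, 0)))
        = pvMapRow n p.1 (fun r =>
            if ¬ s = p.1 ∧ (pvCell R s p.1).isSome ∧ (pvCell R p.1 s).isNone
            then pvSetk r s (some (0, 0)) else r) := by
      intro n p
      by_cases h1 : s = p.1
      · simp [h1, pvMapRow_id]
      · cases hC1 : pvCell R s p.1 with
        | none => simp [h1, pvMapRow_id]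
        | some v1 =>
          cases hC2 : pvCell R p.1 s with
          | some v2 => simp [h1, pvMapRow_id]
          | none => simp [h1, pvSetCell]
    have hinner_eq : network.foldl (fun n p =>
        if s == p.1 then n
        else if (pvCell R s p.1).isNone then n
        else if (pvCell R p.1 s).isSome then n
        else pvSetCell n p.1 s (some (0, 0))) (pvNetMap network w)
      = pvNetMap network (fun a b =>
          if a = s ∧ ¬ s = b ∧ (pvCell R s b).isSome ∧ (pvCell R b s).isNone
          then some (0, 0) else w a b) := by
      refine Eq.trans (PySem.List.foldl_congr_mem _ _ _ _ (fun n p _ => hstep n p)) ?_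
      rw [show pvNetMap network w
            = network.map (fun p => (p.1, p.2.map (fun q => (q.1, w q.1 p.1)))) from rfl]
      rw [pv_foldl_mapRow _ network _ (by simp [List.map_map]) hnd]
      rw [pv_zip_map_self, List.map_map]
      apply List.map_congr_left
      intro p hp
      simp only [Function.comp_apply]
      by_cases hC : ¬ s = p.1 ∧ (pvCell R s p.1).isSome = true ∧ (pvCell R p.1 s).isNone = true
      · obtain ⟨hca, hcb, hcc⟩ := hC
        have hsK : s ∈ network.map (·.1) := hsub s (List.mem_cons_self ..)
        obtain ⟨p'', hp'', hpk⟩ := List.mem_map.1 hsK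
        have hsmem : s ∈ p.2.map (·.1) := by
          rw [← hpk]
          exact hcomp p hp p'' hp'' (fun he => hca (he.trans hpk).symm)
        rw [if_pos ⟨hca, hcb, hcc⟩, pv_setk_map_of_mem p.2 _ s _ (hinner p hp) hsmem]
        congr 1
        apply List.map_congr_left
        intro q hq
        by_cases hqs : q.1 = s
        · simp [hqs, hca, hcb, hcc]
        · simp [hqs]
      · rw [if_neg hC]
        congr 1
        apply List.map_congr_left
        intro q hq
        rw [if_neg (fun h => hC h.2)]
    rw [hinner_eq, ih _ (fun x hx => hsub x (List.mem_cons_of_mem _ hx))]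
    congr 1
    funext a b
    by_cases hC : ¬ a = b ∧ (pvCell R a b).isSome = true ∧ (pvCell R b a).isNone = true
    · obtain ⟨hca, hcb, hcc⟩ := hC
      by_cases hk : a ∈ ks'
      · simp [hk, hca, hcb, hcc, List.mem_cons]
      · by_cases hqs : a = s
        · rw [hqs] at hca hcb hcc ⊢
          simp [hca, hcb, hcc, List.mem_cons]
        · simp [hk, hqs, hca, hcb, hcc, List.mem_cons]
    · have hC2 : ∀ P : Prop, ¬ (P ∧ ¬ a = b ∧ (pvCell R a b).isSome = true ∧ (pvCell R b a).isNone = true) := fun P h => hC h.2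
      rw [if_neg (hC2 _), if_neg (hC2 _), if_neg ?hx]
      case hx =>
        intro h
        rcases h with ⟨hqs, hrest⟩
        rw [← hqs] at hrest
        exact hC hrest
    

theorem pv_cell_eq (network : List (String × List (String × Int)))
    (hpre : Pre_network_to_residual_graph network)
    (p : String × List (String × Int)) (hp : p ∈ network)
    (q : String × Int) (hq : q ∈ p.2) :
    (if q.1 ∈ network.map (·.1) ∧ ¬ q.1 = p.1
        ∧ (pvCell (pvNetMap network (fun a b => pvVal network b a)) q.1 p.1).isSome
        ∧ (pvCell (pvNetMap network (fun a b => pvVal network b a)) p.1 q.1).isNone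
     then some (0, 0) else pvVal network p.1 q.1)
      = pvAltCell network p.1 p.2 q.1 := by
  obtain ⟨hnd, hinner, hcomp⟩ := hpre
  have hndR : (((pvNetMap network (fun a b => pvVal network b a)) : List (String × List (String × Option (Int × Int)))).map (·.1)).Nodup := by
    simpa [pvNetMap, List.map_map, Function.comp] using hnd
  have hrow : pvLookup network p.1 = some p.2 := pvLookup_mem_nodup network p hp hnd
  have hqv : pvLookup p.2 q.1 = some q.2 := pvLookup_mem_nodup p.2 q hq (hinner p hp)
  have hval : pvVal network p.1 q.1
      = if p.1 == q.1 || q.2 == 0 then none else some (0, q.2) := by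
    simp [pvVal, hrow, hqv]
  have hRrow : pvLookup (pvNetMap network (fun a b => pvVal network b a)) p.1
      = some (p.2.map (fun q' => (q'.1, pvVal network p.1 q'.1))) :=
    pvLookup_mem_nodup (pvNetMap network (fun a b => pvVal network b a))
      (p.1, p.2.map (fun q' => (q'.1, pvVal network p.1 q'.1)))
      (List.mem_map_of_mem hp) hndR
  have hcellpq : pvCell (pvNetMap network (fun a b => pvVal network b a)) p.1 q.1 = pvVal network p.1 q.1 := by
    have h2 : pvLookup (p.2.map (fun q' => (q'.1, pvVal network p.1 q'.1))) q.1
        = some (pvVal network p.1 q.1) :=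
      pvLookup_mem_nodup _ (q.1, pvVal network p.1 q.1)
        (List.mem_map_of_mem hq)
        (by simpa [List.map_map, Function.comp] using hinner p hp)
    simp [pvCell, hRrow, h2]
  by_cases hst : p.1 = q.1
  · rw [if_neg (fun h => h.2.1 hst.symm), hval]
    simp [pvAltCell, hst]
  · have hts : ¬ q.1 = p.1 := fun h => hst h.symm
    by_cases hc0 : q.2 = 0
    · have hpqnone : pvCell (pvNetMap network (fun a b => pvVal network b a)) p.1 q.1 = none := by
        rw [hcellpq, hval]; simp [hc0]
      by_cases hK : q.1 ∈ network.map (·.1)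
      · obtain ⟨p', hp', hpk⟩ := List.mem_map.1 hK
        have hrow' : pvLookup network q.1 = some p'.2 := by
          rw [← hpk]; exact pvLookup_mem_nodup network p' hp' hnd
        have hne' : p'.1 ≠ p.1 := by rw [hpk]; exact fun he => hst he.symm
        have hmem' : p.1 ∈ p'.2.map (·.1) := hcomp p' hp' p hp hne' 
        obtain ⟨qq, hqq, hqqk⟩ := List.mem_map.1 hmem'
        have hq'v : pvLookup p'.2 p.1 = some qq.2 := by
          rw [← hqqk]; exact pvLookup_mem_nodup p'.2 qq hqq (hinner p' hp')
        have hRrow' : pvLookup (pvNetMap network (fun a b => pvVal network b a)) q.1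
            = some (p'.2.map (fun q' => (q'.1, pvVal network q.1 q'.1))) := by
          rw [← hpk]
          simpa [hpk] using (pvLookup_mem_nodup (pvNetMap network (fun a b => pvVal network b a))
            (p'.1, p'.2.map (fun q' => (q'.1, pvVal network p'.1 q'.1)))
            (List.mem_map_of_mem hp') hndR)
        have hcellqp : pvCell (pvNetMap network (fun a b => pvVal network b a)) q.1 p.1 = pvVal network q.1 p.1 := by
          have h2 : pvLookup (p'.2.map (fun q' => (q'.1, pvVal network q.1 q'.1))) p.1
              = some (pvVal network q.1 p.1) := by
            rw [← hqqk]
            exact pvLookup_mem_nodup _ (qq.1, pvVal network q.1 qq.1)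
              (List.mem_map_of_mem hqq)
              (by simpa [List.map_map, Function.comp] using hinner p' hp')
          simp [pvCell, hRrow', h2]
        have hval' : pvVal network q.1 p.1
            = if q.1 == p.1 || qq.2 == 0 then none else some (0, qq.2) := by
          simp [pvVal, hrow', hq'v]
        by_cases hc' : qq.2 = 0
        · have hno : ¬ (q.1 ∈ network.map (·.1) ∧ ¬ q.1 = p.1
              ∧ (pvCell (pvNetMap network (fun a b => pvVal network b a)) q.1 p.1).isSome = true
              ∧ (pvCell (pvNetMap network (fun a b => pvVal network b a)) p.1 q.1).isNone = true) := by
            intro h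
            have := h.2.2.1
            rw [hcellqp, hval'] at this
            simp [hc'] at this
          rw [if_neg hno, hval]
          simp [pvAltCell, hst, hqv, hc0, hrow', hq'v, hc']
        · have hs1 : (pvCell (pvNetMap network (fun a b => pvVal network b a)) q.1 p.1).isSome = true := by
            rw [hcellqp, hval']; simp [hc', hts]
          have hn1 : (pvCell (pvNetMap network (fun a b => pvVal network b a)) p.1 q.1).isNone = true := by rw [hpqnone]; rfl
          rw [if_pos ⟨hK, hts, hs1, hn1⟩]
          simp [pvAltCell, hst, hqv, hc0, hrow', hq'v, hc']
      · rw [if_neg (fun h => hK h.1), hval]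
        have hnone : pvLookup network q.1 = none := (pvLookup_eq_none_iff network q.1).2 hK
        simp [pvAltCell, hst, hqv, hc0, hnone]
    · have hno : ¬ (q.1 ∈ network.map (·.1) ∧ ¬ q.1 = p.1
          ∧ (pvCell (pvNetMap network (fun a b => pvVal network b a)) q.1 p.1).isSome = true
          ∧ (pvCell (pvNetMap network (fun a b => pvVal network b a)) p.1 q.1).isNone = true) := by
        intro h
        have := h.2.2.2
        rw [hcellpq, hval] at this
        simp [hst, hc0] at this
      rw [if_neg hno, hval]
      simp [pvAltCell, hst, hqv, hc0]

theorem pv_main (network : List (String × List (String × Int)))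
    (hpre : Pre_network_to_residual_graph network) :
    network_to_residual_graph network = network_to_residual_graph_alt network := by
  have hnd := hpre.1
  have h1 := pv_pass1 network hpre
  simp only [network_to_residual_graph]
  rw [h1]
  have hstep : ∀ (n : List (String × List (String × Option (Int × Int))))
      (p : String × List (String × Option (Int × Int))),
      ((pvNetMap network (fun a b => pvVal network b a)) : List (String × List (String × Option (Int × Int)))).foldl (fun n q =>
        if p.1 == q.1 then n
        else if (pvCell (pvNetMap network (fun a b => pvVal network b a)) p.1 q.1).isNone then n
        else if (pvCell (pvNetMap network (fun a b => pvVal network b a)) q.1 p.1).isSome then n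
        else pvSetCell n q.1 p.1 (some (0, 0))) n
      = network.foldl (fun n q =>
        if p.1 == q.1 then n
        else if (pvCell (pvNetMap network (fun a b => pvVal network b a)) p.1 q.1).isNone then n
        else if (pvCell (pvNetMap network (fun a b => pvVal network b a)) q.1 p.1).isSome then n
        else pvSetCell n q.1 p.1 (some (0, 0))) n := by
    intro n p
    exact List.foldl_map
  refine Eq.trans (PySem.List.foldl_congr_mem _ _ _ _ (fun n p _ => hstep n p)) ?_
  have houter : ((pvNetMap network (fun a b => pvVal network b a)) : List (String × List (String × Option (Int × Int)))).foldl (fun n p =>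
      network.foldl (fun n q =>
        if p.1 == q.1 then n
        else if (pvCell (pvNetMap network (fun a b => pvVal network b a)) p.1 q.1).isNone then n
        else if (pvCell (pvNetMap network (fun a b => pvVal network b a)) q.1 p.1).isSome then n
        else pvSetCell n q.1 p.1 (some (0, 0))) n) (pvNetMap network (fun a b => pvVal network b a))
      = (network.map (·.1)).foldl (fun n s =>
          network.foldl (fun n p =>
            if s == p.1 then n
            else if (pvCell (pvNetMap network (fun a b => pvVal network b a)) s p.1).isNone then n
            else if (pvCell (pvNetMap network (fun a b => pvVal network b a)) p.1 s).isSome then n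
            else pvSetCell n p.1 s (some (0, 0))) n) (pvNetMap network (fun a b => pvVal network b a)) := by
    refine Eq.trans List.foldl_map ?_
    exact Eq.symm List.foldl_map
  rw [houter, pv_pass2 network hpre (pvNetMap network (fun a b => pvVal network b a)) (network.map (·.1)) (fun a b => pvVal network b a) (fun s hs => hs)]
  apply List.map_congr_left
  intro p hp
  congr 1
  apply List.map_congr_left
  intro q hq
  congr 1
  exact pv_cell_eq network hpre p hp q hq


-- ===== VERDICT (by name: the statement is the Claim_ definition above) =====
theorem network_to_residual_graph_spec : Claim_equal_network_to_residual_graph := by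
  intro network _ hpre
  unfold Spec_network_to_residual_graph
  exact pv_main network hpre
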